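-- pv_equiv track=rewrite | github.com/seahrh/coding-interview | src/codi/recursion/diving_board.py | all_lengths_rec
-- ===== SOURCE A (Python) =====
-- from typing import Set
--
-- def all_lengths_rec(k: int, shorter: int, longer: int) -> Set[int]:
--     """Recursive solution
--     O(k) time and O(k) space (to store the result)
--     """
--     if k < 1:
--         raise ValueError("k must not be less than 1")
--     if k == 1:  # base case
--         return {shorter, longer}
--     res = set()
--     for _len in all_lengths_rec(k - 1, shorter, longer):
--         res.add(_len + shorter)
--         res.add(_len + longer)
--     return res
-- ===== SOURCE B (Python) =====
-- def all_lengths_rec(k: int, shorter: int, longer: int):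
--     """Closed form: each total uses i longer and k-i shorter boards, i = 0..k."""
--     if k < 1:
--         raise ValueError("k must not be less than 1")
--     return {shorter * (k - i) + longer * i for i in range(k + 1)}
-- ===== Notes on version B (the rewrite author's own statement) =====
-- stated objective: faster
-- what changed: Replaced the recursion that rebuilds a k-element set from the (k-1)-element set at every level with the closed-form set comprehension {shorter*(k-i)+longer*i for i in 0..k}, computed in one pass.
import Mathlib
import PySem

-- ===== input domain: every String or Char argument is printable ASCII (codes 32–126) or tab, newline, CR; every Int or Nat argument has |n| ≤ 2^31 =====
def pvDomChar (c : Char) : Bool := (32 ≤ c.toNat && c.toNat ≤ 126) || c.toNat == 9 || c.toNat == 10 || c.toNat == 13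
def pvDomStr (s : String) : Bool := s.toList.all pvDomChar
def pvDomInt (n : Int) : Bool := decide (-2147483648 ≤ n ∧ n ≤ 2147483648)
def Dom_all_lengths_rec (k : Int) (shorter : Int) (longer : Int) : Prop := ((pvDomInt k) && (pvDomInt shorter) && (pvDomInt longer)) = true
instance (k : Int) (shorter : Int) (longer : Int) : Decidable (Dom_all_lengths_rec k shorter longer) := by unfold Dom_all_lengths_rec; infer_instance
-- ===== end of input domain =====

-- B replaces A's recursive set-doubling with the closed form {shorter*(k-i)+longer*i : i = 0..k}: O(k) instead of O(k^2).


-- ===== PORT A =====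
-- Python set → PySem.Set (List Int of distinct elements); the k < 1 branch raises in Python (excluded by Pre_), [] here.
def all_lengths_rec (k : Int) (shorter : Int) (longer : Int) : List Int :=
  if _h1 : k < 1 then []
  else if _h2 : k = 1 then PySem.Set.ofList [shorter, longer]
  else
    (all_lengths_rec (k - 1) shorter longer).foldl
      (fun res x => PySem.Set.add (PySem.Set.add res (x + shorter)) (x + longer))
      PySem.Set.empty
termination_by k.toNat
decreasing_by omega

-- ===== PORT B =====
def all_lengths_rec_alt (k : Int) (shorter : Int) (longer : Int) : List Int :=
  if _h : k < 1 then []   -- Python B raises here (excluded by Pre_)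
  else PySem.Set.ofList
    ((PySem.List.pyRange 0 (k + 1) 1).map (fun i => shorter * (k - i) + longer * i))

-- ===== PRECONDITION & SPEC =====
-- Pre_ excludes exactly k < 1, where the Python A (and B) raise ValueError.
def Pre_all_lengths_rec (k : Int) (shorter : Int) (longer : Int) : Prop := 1 ≤ k
instance (k : Int) (shorter : Int) (longer : Int) : Decidable (Pre_all_lengths_rec k shorter longer) := by unfold Pre_all_lengths_rec; infer_instance
def pvWitness_all_lengths_rec : Int × Int × Int := (3, 1, 2)

def Spec_all_lengths_rec (k : Int) (shorter : Int) (longer : Int) (out : List Int) : Prop := out = all_lengths_rec_alt k shorter longer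
instance (k : Int) (shorter : Int) (longer : Int) (out : List Int) : Decidable (Spec_all_lengths_rec k shorter longer out) := by unfold Spec_all_lengths_rec; infer_instance

-- ===== CLAIM (what is proved, stated in full; the proofs are below) =====
def Claim_equal_all_lengths_rec : Prop := ∀ (k : Int) (shorter : Int) (longer : Int), Dom_all_lengths_rec k shorter longer → Pre_all_lengths_rec k shorter longer → Spec_all_lengths_rec k shorter longer (all_lengths_rec k shorter longer)

-- ===== LEMMAS AND PROOFS =====

-- the canonical value list for k boards: j long boards, k-j short ones, j = 0..k
def pvCanon (s l : Int) (k : Nat) : List Int :=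
  (List.range (k + 1)).map (fun j : Nat => s * ((k : Int) - (j : Int)) + l * (j : Int))

-- A's loop body, as update of the accumulator with an interleaved list
theorem pv_foldl2_eq_update (s l : Int) (ys : List Int) (acc : List Int) :
    ys.foldl (fun res x => PySem.Set.add (PySem.Set.add res (x + s)) (x + l)) acc
      = PySem.Set.update acc (ys.flatMap fun x => [x + s, x + l]) := by
  induction ys generalizing acc with
  | nil => simp [PySem.Set.update_nil]
  | cons x t ih => simp [List.flatMap_cons, PySem.Set.update_cons, ih]

theorem pv_update_of_subset {ys s : List Int} (h : ∀ y ∈ ys, y ∈ s) :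
    PySem.Set.update s ys = s := by
  rw [PySem.Set.update_eq_append_filter]
  have hnil : ((PySem.Set.ofList ys).filter (fun y => !(PySem.Set.contains s y))) = [] := by
    rw [List.filter_eq_nil_iff]
    intro a ha
    rw [PySem.Set.mem_ofList] at ha
    simpa using h a ha
  rw [hnil, List.append_nil]

-- dedup before flatMap does not change the resulting set
theorem pv_ofList_flatMap_ofList (f : Int → List Int) (L : List Int) :
    PySem.Set.ofList ((PySem.Set.ofList L).flatMap f) = PySem.Set.ofList (L.flatMap f) := by
  induction L using List.reverseRecOn with
  | nil => simp
  | append_singleton L' x ih =>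
    rw [PySem.Set.ofList_append_singleton]
    by_cases hx : x ∈ L'
    · have hx' : x ∈ PySem.Set.ofList L' := by rw [PySem.Set.mem_ofList]; exact hx
      rw [PySem.Set.add_of_mem hx', ih, List.flatMap_append, PySem.Set.ofList_append]
      symm
      apply pv_update_of_subset
      intro y hy
      rw [PySem.Set.mem_ofList]
      simp only [List.flatMap_singleton] at hy
      exact List.mem_flatMap.2 ⟨x, hx, hy⟩
    · have hx' : x ∉ PySem.Set.ofList L' := by rw [PySem.Set.mem_ofList]; exact hx
      rw [PySem.Set.add_of_not_mem hx', List.flatMap_append, List.flatMap_append,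
        PySem.Set.ofList_append, PySem.Set.ofList_append, ih]

-- collapsing the interleaved list [W 0, W 1, W 1, W 2, …, W m] to [W 0, …, W m]
theorem pv_interleave (W : Nat → Int) :
    ∀ m : Nat, 1 ≤ m →
      PySem.Set.ofList ((List.range m).flatMap (fun j : Nat => [W j, W (j + 1)]))
        = PySem.Set.ofList ((List.range (m + 1)).map W) := by
  intro m
  induction m with
  | zero => omega
  | succ n ih =>
    intro _
    by_cases hn : 1 ≤ n
    · have IH := ih hn
      rw [List.range_succ, List.flatMap_append, PySem.Set.ofList_append,
        List.flatMap_singleton, PySem.Set.update_cons, PySem.Set.update_cons,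
        PySem.Set.update_nil, IH]
      have hmem : W n ∈ PySem.Set.ofList ((List.range (n + 1)).map W) := by
        rw [PySem.Set.mem_ofList]
        exact List.mem_map.2 ⟨n, by simp, rfl⟩
      rw [PySem.Set.add_of_mem hmem]
      conv_rhs => rw [List.range_succ, List.map_append, List.map_singleton,
        PySem.Set.ofList_append_singleton]
    · have hn0 : n = 0 := by omega
      subst hn0
      simp [List.range_succ]

-- characterisation of A's result
theorem pv_A_char (s l : Int) : ∀ n : Nat,
    all_lengths_rec ((n : Int) + 1) s l = PySem.Set.ofList (pvCanon s l (n + 1)) := by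
  intro n
  induction n with
  | zero =>
    have h0 : (((0 : Nat) : Int)) + 1 = 1 := by norm_num
    rw [h0, all_lengths_rec, dif_neg (by norm_num), dif_pos rfl]
    have hc : pvCanon s l 1 = [s, l] := by
      simp [pvCanon, List.range_succ]
    rw [hc]
  | succ n ih =>
    rw [all_lengths_rec, dif_neg (by push_cast; omega), dif_neg (by push_cast; omega)]
    have hk : (((n + 1 : Nat) : Int)) + 1 - 1 = ((n : Int)) + 1 := by push_cast; ring
    rw [hk, ih, pv_foldl2_eq_update, PySem.Set.update_empty,
      pv_ofList_flatMap_ofList]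
    rw [pvCanon, List.flatMap_map, pvCanon,
      ← pv_interleave (fun i : Nat => s * (((n + 1 + 1 : Nat) : Int) - (i : Int)) + l * (i : Int))
        (n + 1 + 1) (by omega)]
    congr 1
    congr 1
    funext j
    push_cast
    congr 1
    · ring
    congr 1
    ring

-- B's list is the same canonical list
theorem pv_B_char (s l : Int) (k : Int) (hk : 1 ≤ k) :
    all_lengths_rec_alt k s l = PySem.Set.ofList (pvCanon s l k.toNat) := by
  rw [all_lengths_rec_alt, dif_neg (by omega)]
  congr 1
  rw [PySem.List.pyRange_one, List.map_map, pvCanon]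
  have hlen : (k + 1 - 0).toNat = k.toNat + 1 := by omega
  rw [hlen]
  apply List.map_congr_left
  intro j hj
  simp only [Function.comp]
  have hkk : ((k.toNat : Int)) = k := by omega
  rw [hkk]
  ring_nf

-- ===== VERDICT (by name: the statement is the Claim_ definition above) =====
theorem all_lengths_rec_spec : Claim_equal_all_lengths_rec := by
  intro k s l _ hpre
  unfold Spec_all_lengths_rec
  have hk1 : 1 ≤ k := hpre
  obtain ⟨n, hn⟩ : ∃ n : Nat, k = ((n : Int)) + 1 := ⟨(k.toNat - 1 : Nat), by omega⟩
  subst hn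
  rw [pv_A_char, pv_B_char s l _ (by omega)]
  have ht : (((n : Int)) + 1).toNat = n + 1 := by omega
  rw [ht]
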